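-- pv_equiv track=rewrite | github.com/LAVA-LAB/COOL-MC | common/rl_agents/cooperative_poagents_wrapper.py | extract_actions_for_agents
-- ===== SOURCE A (Python) =====
-- def extract_actions_for_agents(actions):
--     """
--     Extract actions for each agent.
--     """
--     all_actions = []
--     for combined_action in actions:
--         # take1_open2_close3 (number indicate agent)
--         actions = combined_action.split('_')
--         all_actions.append(actions)
--     # Each row i contains now all the actions of agent i
--     all_actions = list(zip(*all_actions))
--     for i in range(len(all_actions)):
--         all_actions[i] = list(all_actions[i])
--         all_actions[i] = list(set(all_actions[i]))
--         # Sort for each agent the actions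
--         all_actions[i].sort()
--     return all_actions
-- ===== SOURCE B (Python) =====
-- def extract_actions_for_agents(actions):
--     if not actions:
--         return []
--     rows = [a.split('_') for a in actions]
--     n = min(len(r) for r in rows)
--     # inverted index: token -> set of agents that use it
--     owners = {}
--     for r in rows:
--         for i in range(n):
--             owners.setdefault(r[i], set()).add(i)
--     # one global sort of all distinct tokens ...
--     universe = sorted(owners)
--     # ... then each agent's list is a filter of that single sorted universe
--     return [[t for t in universe if i in owners[t]] for i in range(n)]
-- ===== Notes on version B (the rewrite author's own statement) =====
-- stated objective: alternative
-- what changed: Instead of transposing with zip and then deduplicating and sorting each agent's column separately, B builds an inverted index (token -> set of agents), sorts the global set of distinct tokens once, and derives each agent's list by filtering that single sorted universe through the index.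
import Mathlib
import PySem

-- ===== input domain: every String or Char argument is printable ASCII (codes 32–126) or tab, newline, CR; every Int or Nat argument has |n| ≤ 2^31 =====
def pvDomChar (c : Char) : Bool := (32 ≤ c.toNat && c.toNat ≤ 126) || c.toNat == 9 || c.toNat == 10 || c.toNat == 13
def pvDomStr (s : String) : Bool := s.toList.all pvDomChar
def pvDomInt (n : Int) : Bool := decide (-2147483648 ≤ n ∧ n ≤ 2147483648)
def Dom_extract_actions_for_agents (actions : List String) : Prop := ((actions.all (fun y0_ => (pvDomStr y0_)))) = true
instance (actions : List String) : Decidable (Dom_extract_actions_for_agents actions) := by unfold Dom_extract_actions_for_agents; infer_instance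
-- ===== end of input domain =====

-- B replaces A's zip(*…) transpose followed by per-column set/sort passes with an inverted
-- index (token → set of agents) plus one global sort of the distinct tokens, each agent's
-- list being a filter of that single sorted universe; objective: alternative.

-- ===== PORT A =====
-- min of the row lengths of a nonempty rows list (used only by the zip(*rows) model below)
def pvZipMinLen (r : List String) (rs : List (List String)) : Nat :=
  rs.foldl (fun m l => min m l.length) r.length

-- exact model of Python's list(zip(*rows)) (tuples as lists): truncates to the shortest row,
-- [] when rows is empty; getD never hits its default since j < every row length
def pyZipStar (rows : List (List String)) : List (List String) :=
  match rows with
  | [] => []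
  | r :: rs =>
      (List.range (pvZipMinLen r rs)).map (fun j => (r :: rs).map (fun t => t.getD j ""))

def extract_actions_for_agents (actions : List String) : List (List String) :=
  let all_actions := actions.foldl (fun acc s => acc ++ [(PySem.Str.split? s "_").getD []]) []
  let zipped := pyZipStar all_actions
  -- split? is some since "_" is nonempty (getD default unreachable);
  -- list(set(row)) is consumed only through .sort() (no key): exact via PySem.Set.ofList
  zipped.map (fun row => PySem.List.sorted (PySem.Set.ofList row) (fun x => x) false)

-- ===== PORT B =====
-- the inverted-index loop: owners.setdefault(r[i], set()).add(i) mutates the set stored at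
-- r[i] in place — exact as insert k (Set.add (getD k ∅) i), since setdefault keeps an
-- existing key's position exactly as insert does; r[i] is in range since i < n ≤ len(r)
def pvOwners (rows : List (List String)) (n : Nat) : PySem.Dict String (PySem.Set Int) :=
  rows.foldl
    (fun d r =>
      (List.range n).foldl
        (fun d (i : Nat) =>
          d.insert (r.getD i "") (PySem.Set.add (d.getD (r.getD i "") []) (i : Int)))
        d)
    PySem.Dict.empty

def extract_actions_for_agents_alt (actions : List String) : List (List String) :=
  match actions with
  | [] => []
  | _ :: _ =>
      let rows := actions.map (fun a => (PySem.Str.split? a "_").getD [])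
      -- n = min(len(r) for r in rows); min? is some since rows ≠ [] (getD default unreachable)
      let n := ((PySem.List.min? (rows.map (fun r => r.length)) (fun x => x)).getD 0 : Nat)
      let owners := pvOwners rows n
      -- universe = sorted(owners): iterating a dict yields its keys
      let univ_ := PySem.List.sorted owners.keys (fun x => x) false
      -- owners[t]: KeyError unreachable since t ∈ universe = owners' keys
      (List.range n).map (fun (i : Nat) =>
        univ_.filter (fun t => PySem.Set.contains (owners.getD t []) (i : Int)))

-- ===== PRECONDITION & SPEC =====
def Spec_extract_actions_for_agents (actions : List String) (out : List (List String)) : Prop := out = extract_actions_for_agents_alt actions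
instance (actions : List String) (out : List (List String)) : Decidable (Spec_extract_actions_for_agents actions out) := by unfold Spec_extract_actions_for_agents; infer_instance

-- ===== CLAIM (what is proved, stated in full; the proofs are below) =====
def Claim_equal_extract_actions_for_agents : Prop := ∀ (actions : List String), Dom_extract_actions_for_agents actions → Spec_extract_actions_for_agents actions (extract_actions_for_agents actions)

-- ===== LEMMAS AND PROOFS =====

-- A's first loop builds the list of token lists by appends
theorem pv_foldl_append_map (f : String → List String) (actions : List String)
    (acc : List (List String)) :
    actions.foldl (fun acc s => acc ++ [f s]) acc = acc ++ actions.map f := by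
  induction actions generalizing acc with
  | nil => simp
  | cons a rest ih => simp [List.foldl_cons, ih, List.append_assoc]

-- B's n equals A's zip truncation length
theorem pv_minLen_eq (r : List String) (rs : List (List String)) :
    ((PySem.List.min? ((r :: rs).map (fun t => t.length)) (fun x => x)).getD 0 : Nat)
      = pvZipMinLen r rs := by
  rw [List.map_cons, PySem.List.min?_id_cons]
  simp [pvZipMinLen, List.foldl_map]

-- the owners dict holds exactly the (truncated) tokens as keys, in first-appearance order
theorem pv_owners_keys (rows : List (List String)) (n : Nat)
    (d : PySem.Dict String (PySem.Set Int)) :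
    (rows.foldl
      (fun d r =>
        (List.range n).foldl
          (fun d i => d.insert (r.getD i "") (PySem.Set.add (d.getD (r.getD i "") []) (i : Int)))
          d)
      d).keys
    = PySem.Set.update d.keys (rows.flatMap (fun r => (List.range n).map (fun i => r.getD i ""))) := by
  induction rows generalizing d with
  | nil => simp [PySem.Set.update]
  | cons r rs ih =>
      rw [List.foldl_cons, ih, PySem.Dict.keys_foldl_insert_key, List.flatMap_cons,
        PySem.Set.update, PySem.Set.update, PySem.Set.update, List.foldl_append]

-- membership in an owners entry: agent x owns token t iff some row has t at position x < n
theorem pv_owners_mem (rows : List (List String)) (n : Nat)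
    (d : PySem.Dict String (PySem.Set Int)) (t : String) (x : Int) :
    (x ∈ (rows.foldl
      (fun d r =>
        (List.range n).foldl
          (fun d (i : Nat) =>
            d.insert (r.getD i "") (PySem.Set.add (d.getD (r.getD i "") []) (i : Int)))
          d)
      d).getD t []
    ↔ x ∈ d.getD t [] ∨ ∃ r ∈ rows, ∃ i < n, (i : Int) = x ∧ r.getD i "" = t) := by
  induction rows generalizing d with
  | nil => simp
  | cons r rs ih =>
      rw [List.foldl_cons, ih]
      have inner : ∀ (m : Nat) (d : PySem.Dict String (PySem.Set Int)) (t' : String),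
          (x ∈ ((List.range m).foldl
            (fun d (i : Nat) =>
              d.insert (r.getD i "") (PySem.Set.add (d.getD (r.getD i "") []) (i : Int)))
            d).getD t' []
          ↔ x ∈ d.getD t' [] ∨ ∃ i < m, (i : Int) = x ∧ r.getD i "" = t') := by
        intro m
        induction m with
        | zero => simp
        | succ m ihm =>
            intro d t'
            rw [List.range_succ, List.foldl_append, List.foldl_cons, List.foldl_nil,
              PySem.Dict.getD_insert]
            split_ifs with he
            · subst he
              rw [PySem.Set.mem_add, ihm]
              constructor
              · rintro ((h | ⟨i, hi, hx, ht⟩) | h)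
                · exact Or.inl h
                · exact Or.inr ⟨i, by omega, hx, ht⟩
                · exact Or.inr ⟨m, by omega, h.symm, rfl⟩
              · rintro (h | ⟨i, hi, hx, ht⟩)
                · exact Or.inl (Or.inl h)
                · rcases Nat.lt_succ_iff_lt_or_eq.mp hi with hi' | rfl
                  · exact Or.inl (Or.inr ⟨i, hi', hx, ht⟩)
                  · exact Or.inr hx.symm
            · rw [ihm]
              constructor
              · rintro (h | ⟨i, hi, hx, ht⟩)
                · exact Or.inl h
                · exact Or.inr ⟨i, by omega, hx, ht⟩
              · rintro (h | ⟨i, hi, hx, ht⟩)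
                · exact Or.inl h
                · rcases Nat.lt_succ_iff_lt_or_eq.mp hi with hi' | rfl
                  · exact Or.inr ⟨i, hi', hx, ht⟩
                  · exact absurd ht.symm he
      rw [inner]
      constructor
      · rintro ((h | ⟨i, hi, hx, ht⟩) | ⟨r', hr', i, hi, hx, ht⟩)
        · exact Or.inl h
        · exact Or.inr ⟨r, List.mem_cons_self, i, hi, hx, ht⟩
        · exact Or.inr ⟨r', List.mem_cons_of_mem _ hr', i, hi, hx, ht⟩
      · rintro (h | ⟨r', hr', i, hi, hx, ht⟩)
        · exact Or.inl (Or.inl h)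
        · rcases List.mem_cons.mp hr' with rfl | hr'
          · exact Or.inl (Or.inr ⟨i, hi, hx, ht⟩)
          · exact Or.inr ⟨r', hr', i, hi, hx, ht⟩

-- the heart: column j's sorted set equals the filter of the globally sorted universe,
-- for any boolean test deciding "some row has t at position j"
theorem pv_column_eq (rows : List (List String)) (n j : Nat) (hj : j < n)
    (p : String → Bool) (hp : ∀ t, p t = true ↔ ∃ r ∈ rows, r.getD j "" = t) :
    PySem.List.sorted (PySem.Set.ofList (rows.map (fun t => t.getD j ""))) (fun x => x) false
      = (PySem.List.sorted
          (PySem.Set.ofList (rows.flatMap (fun r => (List.range n).map (fun i => r.getD i ""))))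
          (fun x => x) false).filter p := by
  apply PySem.List.sorted_eq_of_perm_of_pairwise_lt
  · -- permutation: both sides are nodup with the same membership
    have h1 : ((PySem.List.sorted
        (PySem.Set.ofList (rows.flatMap (fun r => (List.range n).map (fun i => r.getD i ""))))
        (fun x => x) false).filter p).Nodup :=
      ((PySem.List.sorted_ofList_pairwise_lt _).sublist List.filter_sublist).imp ne_of_lt
    have h2 : (PySem.Set.ofList (rows.map (fun t => t.getD j ""))).Nodup :=
      PySem.Set.nodup_ofList _
    refine (List.perm_ext_iff_of_nodup h1 h2).mpr (fun t => ?_)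
    simp only [List.mem_filter, PySem.List.mem_sorted, PySem.Set.mem_ofList,
      List.mem_flatMap, List.mem_map, List.mem_range, hp]
    constructor
    · rintro ⟨-, r, hr, ht⟩
      exact ⟨r, hr, ht⟩
    · rintro ⟨r, hr, ht⟩
      exact ⟨⟨r, hr, j, hj, ht⟩, r, hr, ht⟩
  · exact (PySem.List.sorted_ofList_pairwise_lt _).sublist List.filter_sublist

-- the whole result, stated over the already-split rows
theorem pv_main (rows : List (List String)) (hrows : rows ≠ []) :
    (pyZipStar rows).map
        (fun row => PySem.List.sorted (PySem.Set.ofList row) (fun x => x) false)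
      = (List.range ((PySem.List.min? (rows.map (fun r => r.length)) (fun x => x)).getD 0)).map
          (fun (i : Nat) =>
            (PySem.List.sorted
              (pvOwners rows
                ((PySem.List.min? (rows.map (fun r => r.length)) (fun x => x)).getD 0)).keys
              (fun x => x) false).filter
              (fun t => PySem.Set.contains
                ((pvOwners rows
                  ((PySem.List.min? (rows.map (fun r => r.length)) (fun x => x)).getD 0)).getD t [])
                (i : Int))) := by
  obtain ⟨r, rs, rfl⟩ : ∃ r rs, rows = r :: rs := by
    cases rows with
    | nil => exact absurd rfl hrows
    | cons r rs => exact ⟨r, rs, rfl⟩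
  rw [pv_minLen_eq]
  rw [show (pvOwners (r :: rs) (pvZipMinLen r rs)).keys
        = PySem.Set.ofList ((r :: rs).flatMap
            (fun r' => (List.range (pvZipMinLen r rs)).map (fun i => r'.getD i "")))
      from by rw [pvOwners, pv_owners_keys]; simp [PySem.Set.ofList_eq_foldl, PySem.Set.update]]
  simp only [pyZipStar, List.map_map]
  apply List.map_congr_left
  intro j hj
  rw [List.mem_range] at hj
  apply pv_column_eq (r :: rs) _ j hj
  intro t
  rw [show ∀ s : PySem.Set Int, PySem.Set.contains s (j : Int) = true ↔ (j : Int) ∈ s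
      from fun s => by simp [PySem.Set.contains]]
  rw [pvOwners, pv_owners_mem]
  simp only [PySem.Dict.getD_empty, List.not_mem_nil, false_or]
  constructor
  · rintro ⟨r', hr', i, hi, hx, ht⟩
    rw [show i = j from by exact_mod_cast hx] at ht
    exact ⟨r', hr', ht⟩
  · rintro ⟨r', hr', ht⟩
    exact ⟨r', hr', j, hj, rfl, ht⟩

-- ===== VERDICT (by name: the statement is the Claim_ definition above) =====
theorem extract_actions_for_agents_spec : Claim_equal_extract_actions_for_agents := by
  intro actions _
  unfold Spec_extract_actions_for_agents extract_actions_for_agents extract_actions_for_agents_alt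
  cases actions with
  | nil => rfl
  | cons a rest =>
      rw [pv_foldl_append_map, List.nil_append]
      exact pv_main ((a :: rest).map (fun s => (PySem.Str.split? s "_").getD [])) (by simp)
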